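-- pv_equiv track=rewrite | github.com/posl/comment_recommendation | script/split_gen/1_time/zh/167_C/4.py | dp
-- ===== SOURCE A (Python) =====
-- def dp(N,M,X,C,A):
--     dp = [[float('inf') for _ in range(X+1)] for _ in range(M+1)]
--     dp[0][0] = 0
--     for i in range(N):
--         for j in range(M-1,-1,-1):
--             for k in range(X+1):
--                 if k >= C[i]:
--                     dp[j+1][k] = min(dp[j+1][k],dp[j][k-C[i]]+A[i])
--     return dp[M][X] if dp[M][X] != float('inf') else -1
-- ===== SOURCE B (Python) =====
-- def dp(N, M, X, C, A):
--     # Top-down memoized recursion: solve(i, j, rem) = minimum total A over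
--     # subsets of the first i items of size exactly j and cost sum exactly rem
--     # (None = unreachable).  Only reachable states are ever visited.
--     memo = {}
--
--     def solve(i, j, rem):
--         if j == 0:
--             return 0 if rem == 0 else None
--         if i <= 0 or rem < 0:
--             return None
--         key = (i, j, rem)
--         if key in memo:
--             return memo[key]
--         best = solve(i - 1, j, rem)
--         c = C[i - 1]
--         if c <= rem:
--             t = solve(i - 1, j - 1, rem - c)
--             if t is not None:
--                 t += A[i - 1]
--                 if best is None or t < best:
--                     best = t
--         memo[key] = best
--         return best
--
--     res = solve(N, M, X)
--     return res if res is not None else -1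
-- ===== Notes on version B (the rewrite author's own statement) =====
-- stated objective: alternative
-- what changed: Replaces the bottom-up dense (M+1)x(X+1) table swept once per item with a top-down memoized recursion solve(i,j,rem) over (prefix length, items left, remaining cost) that only ever visits reachable states.
import Mathlib
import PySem

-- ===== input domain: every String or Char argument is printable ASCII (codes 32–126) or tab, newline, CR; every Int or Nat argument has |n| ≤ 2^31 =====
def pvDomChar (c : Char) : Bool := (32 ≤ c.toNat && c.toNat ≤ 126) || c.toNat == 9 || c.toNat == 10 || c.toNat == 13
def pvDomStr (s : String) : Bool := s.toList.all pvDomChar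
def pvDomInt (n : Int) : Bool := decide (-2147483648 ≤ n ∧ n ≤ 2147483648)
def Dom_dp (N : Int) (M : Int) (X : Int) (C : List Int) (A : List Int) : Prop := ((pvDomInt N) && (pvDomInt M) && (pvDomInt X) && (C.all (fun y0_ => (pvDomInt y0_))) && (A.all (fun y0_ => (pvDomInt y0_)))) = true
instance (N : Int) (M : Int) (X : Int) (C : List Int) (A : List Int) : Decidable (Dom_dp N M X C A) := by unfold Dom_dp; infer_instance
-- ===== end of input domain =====

-- B replaces A's bottom-up dense (M+1)x(X+1) table (swept once per item) with a top-down
-- memoized recursion over (prefix length, items left, remaining cost); objective: alternative.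


-- ===== PORT A =====
-- float('inf') is modeled as `none : Option Int` (all finite table entries are exact integers);
-- min and + on possibly-infinite values:
def infMin : Option Int → Option Int → Option Int
  | none, b => b
  | some a, none => some a
  | some a, some b => some (min a b)

def infAdd : Option Int → Int → Option Int
  | none, _ => none
  | some a, x => some (a + x)

-- the 2-D list dp[j][k] is modeled as a flat array at index j*(X+1)+k (exact under Pre_dp,
-- where every index Python touches is in range; Python raises on the others and Pre_dp excludes them)
def dpGet (X : Int) (t : Array (Option Int)) (j k : Int) : Option Int :=
  t.getD (j * (X + 1) + k).toNat none

def dpSet (X : Int) (t : Array (Option Int)) (j k : Int) (v : Option Int) : Array (Option Int) :=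
  t.setIfInBounds (j * (X + 1) + k).toNat v

def dp (N : Int) (M : Int) (X : Int) (C : List Int) (A : List Int) : Int :=
  -- dp = [[inf]*(X+1) for _ in range(M+1)]; dp[0][0] = 0
  let t0 : Array (Option Int) := Array.replicate ((M + 1) * (X + 1)).toNat none
  let t1 := dpSet X t0 0 0 (some 0)
  -- for i in range(N): for j in range(M-1,-1,-1): for k in range(X+1): ...
  let tF := (PySem.List.pyRange 0 N 1).foldl (fun t i =>
    (PySem.List.pyRange (M - 1) (-1) (-1)).foldl (fun t j =>
      (PySem.List.pyRange 0 (X + 1) 1).foldl (fun t k =>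
        if PySem.List.pyGetD C i 0 ≤ k then
          dpSet X t (j + 1) k
            (infMin (dpGet X t (j + 1) k)
              (infAdd (dpGet X t j (k - PySem.List.pyGetD C i 0)) (PySem.List.pyGetD A i 0)))
        else t) t) t) t1
  -- return dp[M][X] if dp[M][X] != inf else -1
  match dpGet X tF M X with
  | some v => v
  | none => -1

-- ===== PORT B =====
-- solve(i, j, rem) from Source B; the memo dict in Source B only caches solve's own results,
-- the port is the same recursion computed directly.
def solveB (C A : List Int) (i j rem : Int) : Option Int :=
  if j = 0 then (if rem = 0 then some 0 else none)
  else if i ≤ 0 ∨ rem < 0 then none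
  else
    let best := solveB C A (i - 1) j rem
    let c := PySem.List.pyGetD C (i - 1) 0
    if c ≤ rem then
      match solveB C A (i - 1) (j - 1) (rem - c) with
      | none => best
      | some t =>
        let t' := t + PySem.List.pyGetD A (i - 1) 0
        match best with
        | none => some t'
        | some b => if t' < b then some t' else some b
    else best
termination_by i.toNat
decreasing_by all_goals omega

def dp_alt (N : Int) (M : Int) (X : Int) (C : List Int) (A : List Int) : Int :=
  match solveB C A N M X with
  | some v => v
  | none => -1

-- ===== PRECONDITION & SPEC =====
-- Exactly the inputs on which Python A returns: a negative M or X, an N beyond len(C) (with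
-- M ≥ 1), a negative cost C[i], or a missing A[i] for an item with C[i] ≤ X all make A raise
-- IndexError; nothing that A returns on is excluded.
def Pre_dp (N : Int) (M : Int) (X : Int) (C : List Int) (A : List Int) : Prop :=
  0 ≤ M ∧ 0 ≤ X ∧
    (M = 0 ∨ (N ≤ (C.length : Int) ∧ ∀ i ∈ List.range N.toNat,
      0 ≤ PySem.List.pyGetD C (i : Int) 0 ∧
        (PySem.List.pyGetD C (i : Int) 0 ≤ X → (i : Int) < (A.length : Int))))
instance (N : Int) (M : Int) (X : Int) (C : List Int) (A : List Int) : Decidable (Pre_dp N M X C A) := by unfold Pre_dp; infer_instance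

def pvWitness_dp : Int × Int × Int × List Int × List Int := (2, 1, 3, [1, 2], [5, 7])

def Spec_dp (N : Int) (M : Int) (X : Int) (C : List Int) (A : List Int) (out : Int) : Prop := out = dp_alt N M X C A
instance (N : Int) (M : Int) (X : Int) (C : List Int) (A : List Int) (out : Int) : Decidable (Spec_dp N M X C A out) := by unfold Spec_dp; infer_instance

-- ===== CLAIM (what is proved, stated in full; the proofs are below) =====
def Claim_equal_dp : Prop := ∀ (N : Int) (M : Int) (X : Int) (C : List Int) (A : List Int), Dom_dp N M X C A → Pre_dp N M X C A → Spec_dp N M X C A (dp N M X C A)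

-- ===== LEMMAS AND PROOFS =====

-- unfolding lemmas for solveB
theorem solveB_j0 (C A : List Int) (i rem : Int) :
    solveB C A i 0 rem = if rem = 0 then some 0 else none := by
  rw [solveB]; simp

theorem solveB_base (C A : List Int) (i j rem : Int) (hj : j ≠ 0) (h : i ≤ 0 ∨ rem < 0) :
    solveB C A i j rem = none := by
  rw [solveB]; simp [hj, h]

theorem solveB_nonpos (C A : List Int) (i j rem : Int) (hi : i ≤ 0) :
    solveB C A i j rem = solveB C A 0 j rem := by
  by_cases hj : j = 0
  · subst hj; rw [solveB_j0, solveB_j0]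
  · rw [solveB_base C A i j rem hj (Or.inl hi), solveB_base C A 0 j rem hj (Or.inl le_rfl)]

theorem solveB_succ (C A : List Int) (i j rem : Int) (hi : 0 ≤ i) (hj : 1 ≤ j) (hr : 0 ≤ rem) :
    solveB C A (i + 1) j rem =
      if PySem.List.pyGetD C i 0 ≤ rem then
        infMin (solveB C A i j rem)
          (infAdd (solveB C A i (j - 1) (rem - PySem.List.pyGetD C i 0)) (PySem.List.pyGetD A i 0))
      else solveB C A i j rem := by
  rw [solveB]
  have hj0 : ¬ j = 0 := by omega
  have hbase : ¬ (i + 1 ≤ 0 ∨ rem < 0) := by omega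
  simp only [hj0, if_false, hbase, add_sub_cancel_right]
  split
  · rcases h1 : solveB C A i (j - 1) (rem - PySem.List.pyGetD C i 0) with _ | t <;>
      rcases h2 : solveB C A i j rem with _ | b <;>
      simp only [infMin, infAdd, Int.min_def] <;> split_ifs <;> simp_all <;> omega
  · rfl

-- index arithmetic for the flat table
theorem idx_lt (M X j k : Int) (hj0 : 0 ≤ j) (hj : j ≤ M) (hk0 : 0 ≤ k) (hk : k ≤ X) :
    (j * (X + 1) + k).toNat < ((M + 1) * (X + 1)).toNat := by
  have h1 : j * (X + 1) + k < (M + 1) * (X + 1) := by nlinarith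
  have h0 : 0 ≤ j * (X + 1) := mul_nonneg hj0 (by omega)
  omega

theorem idx_inj (X j k j' k' : Int) (hj0 : 0 ≤ j) (hk0 : 0 ≤ k) (hk : k ≤ X)
    (hj0' : 0 ≤ j') (hk0' : 0 ≤ k') (hk' : k' ≤ X)
    (h : (j * (X + 1) + k).toNat = (j' * (X + 1) + k').toNat) : j = j' ∧ k = k' := by
  have h0 : 0 ≤ j * (X + 1) := mul_nonneg hj0 (by omega)
  have h0' : 0 ≤ j' * (X + 1) := mul_nonneg hj0' (by omega)
  have heq : j * (X + 1) + k = j' * (X + 1) + k' := by omega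
  have hjj : j = j' := by nlinarith [sq_nonneg (j - j')]
  subst hjj
  constructor
  · rfl
  · nlinarith

theorem dpGet_dpSet (M X : Int) (t : Array (Option Int))
    (hs : t.size = ((M + 1) * (X + 1)).toNat)
    (j k j' k' : Int) (v : Option Int)
    (hj0 : 0 ≤ j) (hj : j ≤ M) (hk0 : 0 ≤ k) (hk : k ≤ X)
    (hj0' : 0 ≤ j') (hj' : j' ≤ M) (hk0' : 0 ≤ k') (hk' : k' ≤ X) :
    dpGet X (dpSet X t j k v) j' k' = if j' = j ∧ k' = k then v else dpGet X t j' k' := by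
  have hlt : (j * (X + 1) + k).toNat < t.size := by
    rw [hs]; exact idx_lt M X j k hj0 hj hk0 hk
  by_cases h : j' = j ∧ k' = k
  · obtain ⟨rfl, rfl⟩ := h
    simp [dpGet, dpSet, Array.getD_eq_getD_getElem?, Array.getElem?_setIfInBounds, hlt]
  · have hne : ¬ (j * (X + 1) + k).toNat = (j' * (X + 1) + k').toNat := by
      intro he
      exact h (idx_inj X j' k' j k hj0' hk0' hk' hj0 hk0 hk he.symm)
    simp [dpGet, dpSet, Array.getD_eq_getD_getElem?, Array.getElem?_setIfInBounds, hne, h]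

theorem size_dpSet (X : Int) (t : Array (Option Int)) (j k : Int) (v : Option Int) :
    (dpSet X t j k v).size = t.size := by
  simp [dpSet]

theorem dpGet_replicate (X : Int) (n : Nat) (j k : Int) :
    dpGet X (Array.replicate n (none : Option Int)) j k = none := by
  simp [dpGet, Array.getD]

-- characterization of the inner k-loop
theorem innerK_aux (M X ci ai j : Int) (t : Array (Option Int))
    (hs : t.size = ((M + 1) * (X + 1)).toNat)
    (hX : 0 ≤ X) (hci : 0 ≤ ci) (hj0 : 0 ≤ j) (hjM : j + 1 ≤ M) :
    ∀ n : Nat, (n : Int) ≤ X + 1 →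
      ((PySem.List.pyRange 0 (n : Int) 1).foldl (fun t k =>
        if ci ≤ k then
          dpSet X t (j + 1) k (infMin (dpGet X t (j + 1) k) (infAdd (dpGet X t j (k - ci)) ai))
        else t) t).size = t.size ∧
      ∀ j' k', 0 ≤ j' → j' ≤ M → 0 ≤ k' → k' ≤ X →
        dpGet X ((PySem.List.pyRange 0 (n : Int) 1).foldl (fun t k =>
          if ci ≤ k then
            dpSet X t (j + 1) k (infMin (dpGet X t (j + 1) k) (infAdd (dpGet X t j (k - ci)) ai))
          else t) t) j' k' =
          if j' = j + 1 ∧ k' < (n : Int) ∧ ci ≤ k' then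
            infMin (dpGet X t (j + 1) k') (infAdd (dpGet X t j (k' - ci)) ai)
          else dpGet X t j' k' := by
  intro n
  induction n with
  | zero =>
    intro _
    rw [show ((0 : Nat) : Int) = 0 by rfl, PySem.List.pyRange_one_eq_nil le_rfl]
    refine ⟨rfl, ?_⟩
    intro j' k' b1 b2 b3 b4
    rw [List.foldl_nil, if_neg (by rintro ⟨_, hlt, _⟩; omega)]
  | succ n ih =>
    intro hn
    have hn0 : (0 : Int) ≤ (n : Int) := Int.natCast_nonneg n
    have hn' : (n : Int) ≤ X + 1 := by push_cast at hn; omega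
    obtain ⟨ihs, ihg⟩ := ih hn'
    have hrange : PySem.List.pyRange 0 ((n + 1 : Nat) : Int) 1 =
        PySem.List.pyRange 0 (n : Int) 1 ++ [(n : Int)] := by
      have h := PySem.List.pyRange_one_succ_right (a := 0) (b := (n : Int)) hn0
      push_cast
      exact h
    rw [hrange, List.foldl_append, List.foldl_cons, List.foldl_nil]
    set r := (PySem.List.pyRange 0 (n : Int) 1).foldl (fun t k =>
      if ci ≤ k then
        dpSet X t (j + 1) k (infMin (dpGet X t (j + 1) k) (infAdd (dpGet X t j (k - ci)) ai))
      else t) t with hr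
    have hnX : (n : Int) ≤ X := by push_cast at hn; omega
    by_cases hc : ci ≤ (n : Int)
    · rw [if_pos hc]
      have e1 : dpGet X r (j + 1) (n : Int) = dpGet X t (j + 1) (n : Int) := by
        rw [ihg (j + 1) (n : Int) (by omega) (by omega) hn0 hnX,
          if_neg (by rintro ⟨_, hlt, _⟩; omega)]
      have e2 : dpGet X r j ((n : Int) - ci) = dpGet X t j ((n : Int) - ci) := by
        rw [ihg j _ hj0 (by omega) (by omega) (by omega),
          if_neg (by rintro ⟨hj', _, _⟩; omega)]
      refine ⟨by rw [size_dpSet]; exact ihs, ?_⟩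
      intro j' k' b1 b2 b3 b4
      rw [dpGet_dpSet M X r (by rw [ihs, hs]) (j + 1) (n : Int) j' k' _
        (by omega) (by omega) hn0 hnX b1 b2 b3 b4]
      by_cases he : j' = j + 1 ∧ k' = (n : Int)
      · obtain ⟨rfl, rfl⟩ := he
        rw [if_pos ⟨rfl, rfl⟩, if_pos ⟨rfl, by omega, hc⟩, e1, e2]
      · rw [if_neg he, ihg j' k' b1 b2 b3 b4]
        by_cases hin : j' = j + 1 ∧ k' < (n : Int) ∧ ci ≤ k'
        · rw [if_pos hin, if_pos ⟨hin.1, by omega, hin.2.2⟩]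
        · rw [if_neg hin, if_neg ?_]
          rintro ⟨ha, hb, hcc⟩
          have hk'n : k' ≠ (n : Int) := fun hh => he ⟨ha, hh⟩
          exact hin ⟨ha, by omega, hcc⟩
    · rw [if_neg hc]
      refine ⟨ihs, ?_⟩
      intro j' k' b1 b2 b3 b4
      rw [ihg j' k' b1 b2 b3 b4]
      by_cases hin : j' = j + 1 ∧ k' < (n : Int) ∧ ci ≤ k'
      · rw [if_pos hin, if_pos ⟨hin.1, by omega, hin.2.2⟩]
      · rw [if_neg hin, if_neg ?_]
        rintro ⟨ha, hb, hcc⟩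
        exact hin ⟨ha, by omega, hcc⟩

theorem innerK_char (M X ci ai j : Int) (t : Array (Option Int))
    (hs : t.size = ((M + 1) * (X + 1)).toNat)
    (hX : 0 ≤ X) (hci : 0 ≤ ci) (hj0 : 0 ≤ j) (hjM : j + 1 ≤ M) :
    ((PySem.List.pyRange 0 (X + 1) 1).foldl (fun t k =>
        if ci ≤ k then
          dpSet X t (j + 1) k (infMin (dpGet X t (j + 1) k) (infAdd (dpGet X t j (k - ci)) ai))
        else t) t).size = t.size ∧
    ∀ j' k', 0 ≤ j' → j' ≤ M → 0 ≤ k' → k' ≤ X →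
      dpGet X ((PySem.List.pyRange 0 (X + 1) 1).foldl (fun t k =>
        if ci ≤ k then
          dpSet X t (j + 1) k (infMin (dpGet X t (j + 1) k) (infAdd (dpGet X t j (k - ci)) ai))
        else t) t) j' k' =
        if j' = j + 1 ∧ ci ≤ k' then
          infMin (dpGet X t (j + 1) k') (infAdd (dpGet X t j (k' - ci)) ai)
        else dpGet X t j' k' := by
  have hcast : (((X + 1).toNat : Nat) : Int) = X + 1 := by omega
  obtain ⟨h1, h2⟩ := innerK_aux M X ci ai j t hs hX hci hj0 hjM (X + 1).toNat (by omega)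
  rw [hcast] at h1 h2
  refine ⟨h1, ?_⟩
  intro j' k' b1 b2 b3 b4
  rw [h2 j' k' b1 b2 b3 b4]
  by_cases hin : j' = j + 1 ∧ ci ≤ k'
  · rw [if_pos ⟨hin.1, by omega, hin.2⟩, if_pos hin]
  · rw [if_neg (by rintro ⟨ha, _, hcc⟩; exact hin ⟨ha, hcc⟩), if_neg hin]

-- characterization of the descending j-loop against an abstract old table G
theorem innerJ_char (M X ci ai : Int) (G : Int → Int → Option Int)
    (hX : 0 ≤ X) (hci : 1 ≤ M → 0 ≤ ci) :
    ∀ (jt : Int) (t : Array (Option Int)), -1 ≤ jt → jt ≤ M - 1 →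
      t.size = ((M + 1) * (X + 1)).toNat →
      (∀ j' k', 0 ≤ j' → j' ≤ M → 0 ≤ k' → k' ≤ X →
        dpGet X t j' k' = if jt + 1 < j' then
            (if ci ≤ k' then infMin (G j' k') (infAdd (G (j' - 1) (k' - ci)) ai) else G j' k')
          else G j' k') →
      ((PySem.List.pyRange jt (-1) (-1)).foldl (fun t j =>
        (PySem.List.pyRange 0 (X + 1) 1).foldl (fun t k =>
          if ci ≤ k then
            dpSet X t (j + 1) k (infMin (dpGet X t (j + 1) k) (infAdd (dpGet X t j (k - ci)) ai))
          else t) t) t).size = ((M + 1) * (X + 1)).toNat ∧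
      ∀ j' k', 0 ≤ j' → j' ≤ M → 0 ≤ k' → k' ≤ X →
        dpGet X ((PySem.List.pyRange jt (-1) (-1)).foldl (fun t j =>
          (PySem.List.pyRange 0 (X + 1) 1).foldl (fun t k =>
            if ci ≤ k then
              dpSet X t (j + 1) k (infMin (dpGet X t (j + 1) k) (infAdd (dpGet X t j (k - ci)) ai))
            else t) t) t) j' k' =
          if 0 < j' then
            (if ci ≤ k' then infMin (G j' k') (infAdd (G (j' - 1) (k' - ci)) ai) else G j' k')
          else G j' k' := by
  suffices H : ∀ (fuel : Nat) (jt : Int) (t : Array (Option Int)), (jt + 1).toNat = fuel →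
      -1 ≤ jt → jt ≤ M - 1 → t.size = ((M + 1) * (X + 1)).toNat →
      (∀ j' k', 0 ≤ j' → j' ≤ M → 0 ≤ k' → k' ≤ X →
        dpGet X t j' k' = if jt + 1 < j' then
            (if ci ≤ k' then infMin (G j' k') (infAdd (G (j' - 1) (k' - ci)) ai) else G j' k')
          else G j' k') →
      ((PySem.List.pyRange jt (-1) (-1)).foldl (fun t j =>
        (PySem.List.pyRange 0 (X + 1) 1).foldl (fun t k =>
          if ci ≤ k then
            dpSet X t (j + 1) k (infMin (dpGet X t (j + 1) k) (infAdd (dpGet X t j (k - ci)) ai))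
          else t) t) t).size = ((M + 1) * (X + 1)).toNat ∧
      ∀ j' k', 0 ≤ j' → j' ≤ M → 0 ≤ k' → k' ≤ X →
        dpGet X ((PySem.List.pyRange jt (-1) (-1)).foldl (fun t j =>
          (PySem.List.pyRange 0 (X + 1) 1).foldl (fun t k =>
            if ci ≤ k then
              dpSet X t (j + 1) k (infMin (dpGet X t (j + 1) k) (infAdd (dpGet X t j (k - ci)) ai))
            else t) t) t) j' k' =
          if 0 < j' then
            (if ci ≤ k' then infMin (G j' k') (infAdd (G (j' - 1) (k' - ci)) ai) else G j' k')
          else G j' k' by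
    intro jt t h0 h1 h2 h3
    exact H (jt + 1).toNat jt t rfl h0 h1 h2 h3
  intro fuel
  induction fuel using Nat.strong_induction_on with
  | _ fuel ih =>
    intro jt t hfuel hjtlb hjt hsize hinv
    by_cases hneg : jt ≤ -1
    · rw [PySem.List.pyRange_neg_one_eq_nil hneg, List.foldl_nil]
      refine ⟨hsize, ?_⟩
      intro j' k' b1 b2 b3 b4
      rw [hinv j' k' b1 b2 b3 b4]
      by_cases h0 : 0 < j'
      · rw [if_pos (show jt + 1 < j' by omega), if_pos h0]
      · rw [if_neg (show ¬ jt + 1 < j' by omega), if_neg h0]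
    · have hneg' : 0 ≤ jt := by omega
      have hjt0 : 0 ≤ jt := hneg'
      have hM1 : 1 ≤ M := by omega
      have hci' : 0 ≤ ci := hci hM1
      rw [PySem.List.pyRange_neg_one_cons (by omega : (-1 : Int) < jt), List.foldl_cons]
      obtain ⟨ks, kg⟩ := innerK_char M X ci ai jt t hsize hX hci' hjt0 (by omega : jt + 1 ≤ M)
      set r := (PySem.List.pyRange 0 (X + 1) 1).foldl (fun t k =>
        if ci ≤ k then
          dpSet X t (jt + 1) k (infMin (dpGet X t (jt + 1) k) (infAdd (dpGet X t jt (k - ci)) ai))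
        else t) t with hr
      apply ih jt.toNat (by omega) (jt - 1) r (by omega) (by omega) (by omega) (by rw [ks, hsize])
      intro j' k' b1 b2 b3 b4
      rw [kg j' k' b1 b2 b3 b4]
      by_cases he : j' = jt + 1
      · subst he
        rw [if_pos (by omega : jt - 1 + 1 < jt + 1)]
        by_cases hck : ci ≤ k'
        · rw [if_pos hck, if_pos ⟨rfl, hck⟩]
          have g1 : dpGet X t (jt + 1) k' = G (jt + 1) k' := by
            rw [hinv (jt + 1) k' (by omega) (by omega) b3 b4, if_neg (by omega)]
          have g2 : dpGet X t jt (k' - ci) = G jt (k' - ci) := by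
            rw [hinv jt (k' - ci) hjt0 (by omega) (by omega) (by omega), if_neg (by omega)]
          rw [g1, g2, show jt + 1 - 1 = jt by omega]
        · rw [if_neg hck, if_neg (by rintro ⟨_, hcc⟩; exact hck hcc),
            hinv (jt + 1) k' (by omega) (by omega) b3 b4, if_neg (by omega)]
      · rw [if_neg (by rintro ⟨hh, _⟩; exact he hh), hinv j' k' b1 b2 b3 b4]
        by_cases hgt : jt + 1 < j'
        · rw [if_pos hgt, if_pos (show jt - 1 + 1 < j' by omega)]
        · rw [if_neg hgt, if_neg (show ¬ jt - 1 + 1 < j' by omega)]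

-- the outer i-loop maintains "table cell (j,k) = solveB C A i j k" on the box
theorem ifold_inv (M X : Int) (C A : List Int) (hM : 0 ≤ M) (hX : 0 ≤ X) :
    ∀ (n : Nat),
      (1 ≤ M → ((n : Int) ≤ (C.length : Int) ∧
        ∀ k : Nat, k < n → 0 ≤ PySem.List.pyGetD C (k : Int) 0)) →
      ((PySem.List.pyRange 0 (n : Int) 1).foldl (fun t i =>
        (PySem.List.pyRange (M - 1) (-1) (-1)).foldl (fun t j =>
          (PySem.List.pyRange 0 (X + 1) 1).foldl (fun t k =>
            if PySem.List.pyGetD C i 0 ≤ k then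
              dpSet X t (j + 1) k
                (infMin (dpGet X t (j + 1) k)
                  (infAdd (dpGet X t j (k - PySem.List.pyGetD C i 0)) (PySem.List.pyGetD A i 0)))
            else t) t) t)
        (dpSet X (Array.replicate ((M + 1) * (X + 1)).toNat (none : Option Int)) 0 0 (some 0))).size
          = ((M + 1) * (X + 1)).toNat ∧
      ∀ j k, 0 ≤ j → j ≤ M → 0 ≤ k → k ≤ X →
        dpGet X ((PySem.List.pyRange 0 (n : Int) 1).foldl (fun t i =>
          (PySem.List.pyRange (M - 1) (-1) (-1)).foldl (fun t j =>
            (PySem.List.pyRange 0 (X + 1) 1).foldl (fun t k =>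
              if PySem.List.pyGetD C i 0 ≤ k then
                dpSet X t (j + 1) k
                  (infMin (dpGet X t (j + 1) k)
                    (infAdd (dpGet X t j (k - PySem.List.pyGetD C i 0)) (PySem.List.pyGetD A i 0)))
              else t) t) t)
          (dpSet X (Array.replicate ((M + 1) * (X + 1)).toNat (none : Option Int)) 0 0 (some 0)))
          j k = solveB C A (n : Int) j k := by
  intro n
  induction n with
  | zero =>
    intro _
    rw [show ((0 : Nat) : Int) = 0 by rfl, PySem.List.pyRange_one_eq_nil le_rfl, List.foldl_nil]
    have hsz : (Array.replicate ((M + 1) * (X + 1)).toNat (none : Option Int)).size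
        = ((M + 1) * (X + 1)).toNat := by simp
    refine ⟨by rw [size_dpSet]; exact hsz, ?_⟩
    intro j k b1 b2 b3 b4
    rw [dpGet_dpSet M X _ hsz 0 0 j k _ le_rfl hM le_rfl hX b1 b2 b3 b4]
    by_cases hj : j = 0
    · subst hj
      rw [solveB_j0]
      by_cases hk : k = 0
      · subst hk; rw [if_pos ⟨rfl, rfl⟩, if_pos rfl]
      · rw [if_neg (by rintro ⟨_, hh⟩; exact hk hh), if_neg hk, dpGet_replicate]
    · rw [if_neg (by rintro ⟨hh, _⟩; exact hj hh), dpGet_replicate,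
        solveB_base C A 0 j k hj (Or.inl le_rfl)]
  | succ n ih =>
    intro hyp
    have hyp' : 1 ≤ M → ((n : Int) ≤ (C.length : Int) ∧
        ∀ k : Nat, k < n → 0 ≤ PySem.List.pyGetD C (k : Int) 0) := by
      intro h1
      obtain ⟨ha, hb⟩ := hyp h1
      exact ⟨by push_cast at ha ⊢; omega, fun k hk => hb k (by omega)⟩
    obtain ⟨ihs, ihg⟩ := ih hyp'
    have hn0 : (0 : Int) ≤ (n : Int) := Int.natCast_nonneg n
    have hrange : PySem.List.pyRange 0 ((n + 1 : Nat) : Int) 1 =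
        PySem.List.pyRange 0 (n : Int) 1 ++ [(n : Int)] := by
      have h := PySem.List.pyRange_one_succ_right (a := 0) (b := (n : Int)) hn0
      push_cast
      exact h
    rw [hrange, List.foldl_append, List.foldl_cons, List.foldl_nil]
    set r := (PySem.List.pyRange 0 (n : Int) 1).foldl (fun t i =>
      (PySem.List.pyRange (M - 1) (-1) (-1)).foldl (fun t j =>
        (PySem.List.pyRange 0 (X + 1) 1).foldl (fun t k =>
          if PySem.List.pyGetD C i 0 ≤ k then
            dpSet X t (j + 1) k
              (infMin (dpGet X t (j + 1) k)
                (infAdd (dpGet X t j (k - PySem.List.pyGetD C i 0)) (PySem.List.pyGetD A i 0)))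
          else t) t) t)
      (dpSet X (Array.replicate ((M + 1) * (X + 1)).toNat (none : Option Int)) 0 0 (some 0)) with hr
    have hci : 1 ≤ M → 0 ≤ PySem.List.pyGetD C (n : Int) 0 := fun h1 => (hyp h1).2 n (by omega)
    obtain ⟨js, jg⟩ := innerJ_char M X (PySem.List.pyGetD C (n : Int) 0)
      (PySem.List.pyGetD A (n : Int) 0) (fun j k => solveB C A (n : Int) j k) hX hci
      (M - 1) r (by omega) le_rfl ihs
      (by
        intro j' k' b1 b2 b3 b4
        rw [ihg j' k' b1 b2 b3 b4, if_neg (by omega)])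
    refine ⟨js, ?_⟩
    intro j k b1 b2 b3 b4
    rw [jg j k b1 b2 b3 b4]
    have hcast : ((n + 1 : Nat) : Int) = (n : Int) + 1 := by push_cast; ring
    rw [hcast]
    by_cases h0 : 0 < j
    · rw [if_pos h0, solveB_succ C A (n : Int) j k hn0 (by omega) b3]
    · have hj : j = 0 := by omega
      subst hj
      rw [if_neg h0, solveB_j0, solveB_j0]

-- ===== VERDICT (by name: the statement is the Claim_ definition above) =====
theorem dp_spec : Claim_equal_dp := by
  unfold Claim_equal_dp
  intro N M X C A _ hpre
  unfold Spec_dp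
  obtain ⟨hM, hX, hcase⟩ := hpre
  have hyp : 1 ≤ M → ((N.toNat : Int) ≤ (C.length : Int) ∧
      ∀ k : Nat, k < N.toNat → 0 ≤ PySem.List.pyGetD C (k : Int) 0) := by
    intro h1
    rcases hcase with h0 | ⟨hlen, hall⟩
    · omega
    · refine ⟨by omega, fun k hk => (hall k (List.mem_range.mpr hk)).1⟩
  obtain ⟨_, hg⟩ := ifold_inv M X C A hM hX N.toNat hyp
  have hget := hg M X hM le_rfl hX le_rfl
  have hrange : PySem.List.pyRange 0 N 1 = PySem.List.pyRange 0 ((N.toNat : Nat) : Int) 1 := by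
    by_cases hN : 0 ≤ N
    · rw [Int.toNat_of_nonneg hN]
    · rw [PySem.List.pyRange_one_eq_nil (by omega), PySem.List.pyRange_one_eq_nil (by omega)]
  have hsolve : solveB C A ((N.toNat : Nat) : Int) M X = solveB C A N M X := by
    by_cases hN : 0 ≤ N
    · rw [Int.toNat_of_nonneg hN]
    · rw [solveB_nonpos C A N M X (by omega), show ((N.toNat : Nat) : Int) = 0 by omega]
  unfold dp dp_alt
  dsimp only
  rw [hrange, hget, hsolve]
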